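-- pv_equiv track=rewrite | github.com/kdh-yu/ProblemSolving | python/practice3_cut_brick_wall.py | fewest_number
-- ===== SOURCE A (Python) =====
-- def fewest_number(bricks):
-- 	cuts = {}
-- 	for brick in bricks:
-- 		cut_len = 0
-- 		for cut in brick[:-1]:
-- 			cut_len += cut
-- 			if not cuts.get(cut_len):
-- 				cuts[cut_len] = 0
-- 			cuts[cut_len] += 1
-- 	min_cut = cuts[max(cuts, key=cuts.get)]
-- 	return min_cut
-- ===== SOURCE B (Python) =====
-- def fewest_number(bricks):
--     positions = []
--     for brick in bricks:
--         s = 0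
--         for cut in brick[:-1]:
--             s += cut
--             positions.append(s)
--     positions.sort()
--     best = 0
--     run = 0
--     prev = None
--     for p in positions:
--         run = run + 1 if (prev is not None and p == prev) else 1
--         if best < run:
--             best = run
--         prev = p
--     return best
-- ===== Notes on version B (the rewrite author's own statement) =====
-- stated objective: alternative
-- what changed: Replaces the hash-counter dict and max-by-key lookup with flattening all cut positions into one list, sorting it, and a single linear scan that tracks the longest run of equal consecutive values (= the maximum frequency).
import Mathlib
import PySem

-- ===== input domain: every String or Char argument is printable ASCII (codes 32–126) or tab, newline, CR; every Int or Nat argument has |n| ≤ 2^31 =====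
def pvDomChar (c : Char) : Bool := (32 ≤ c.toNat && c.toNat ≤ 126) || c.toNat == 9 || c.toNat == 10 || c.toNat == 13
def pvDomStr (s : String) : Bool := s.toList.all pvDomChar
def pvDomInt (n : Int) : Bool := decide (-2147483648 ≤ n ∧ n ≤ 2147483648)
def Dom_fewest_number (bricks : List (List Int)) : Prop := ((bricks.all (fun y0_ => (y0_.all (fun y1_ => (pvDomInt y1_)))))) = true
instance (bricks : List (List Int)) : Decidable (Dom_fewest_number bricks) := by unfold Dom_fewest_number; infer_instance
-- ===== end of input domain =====

-- B replaces A's hash-counter + max-by-key with flatten-all-cut-positions, sort, and one linear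
-- scan for the longest run of equal consecutive values (an alternative algorithm, similar cost).


-- ===== PORT A =====
-- the body of A's inner 'for cut in brick[:-1]' loop, carrying (cut_len, cuts)
def fnAStep (st : Int × PySem.Dict Int Int) (cut : Int) : Int × PySem.Dict Int Int :=
  let cut_len := st.1 + cut
  let d := st.2
  -- 'if not cuts.get(cut_len): cuts[cut_len] = 0' — get() is falsy iff missing or 0
  let d := if (d.get? cut_len).getD 0 == 0 then d.insert cut_len 0 else d
  -- 'cuts[cut_len] += 1' — the key is always present here, so getD's default is never used
  (cut_len, d.insert cut_len (d.getD cut_len 0 + 1))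

def fewest_number (bricks : List (List Int)) : Int :=
  let cuts := bricks.foldl
    (fun cuts brick =>
      ((PySem.List.slice brick none (some (-1))).foldl fnAStep ((0 : Int), cuts)).2)
    PySem.Dict.empty
  -- max(cuts, key=cuts.get): every key is present, so cuts.get k = cuts.getD k 0 exactly;
  -- the none branch is Python's ValueError on an empty dict (excluded by Pre_)
  match PySem.List.max? cuts.keys (fun k => cuts.getD k 0) with
  | some k => cuts.getD k 0
  | none => 0

-- ===== PORT B =====
-- inner loop: s += cut; positions.append(s)
def fnBStep (st : Int × List Int) (cut : Int) : Int × List Int :=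
  (st.1 + cut, st.2 ++ [st.1 + cut])

-- final loop: run of equal consecutive values, best = longest run seen
def fnScan : List Int → Option Int → Int → Int → Int
  | [], _, best, _ => best
  | p :: rest, prev, best, run =>
    let run' := if some p == prev then run + 1 else 1
    let best' := if best < run' then run' else best
    fnScan rest (some p) best' run'

def fewest_number_alt (bricks : List (List Int)) : Int :=
  let positions := bricks.foldl
    (fun positions brick =>
      ((PySem.List.slice brick none (some (-1))).foldl fnBStep ((0 : Int), positions)).2)
    []
  let positions := PySem.List.sorted positions (fun x => x) false
  fnScan positions none 0 0

-- ===== PRECONDITION & SPEC =====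
-- Pre_ excludes exactly the inputs with no cut position (no brick has ≥ 2 segments):
-- there A's 'max' over the empty dict raises ValueError.
def Pre_fewest_number (bricks : List (List Int)) : Prop :=
  bricks.any (fun b => decide (2 ≤ b.length)) = true
instance (bricks : List (List Int)) : Decidable (Pre_fewest_number bricks) := by
  unfold Pre_fewest_number; infer_instance

def pvWitness_fewest_number : List (List Int) := [[1, 2, 1], [2, 2]]

def Spec_fewest_number (bricks : List (List Int)) (out : Int) : Prop := out = fewest_number_alt bricks
instance (bricks : List (List Int)) (out : Int) : Decidable (Spec_fewest_number bricks out) := by unfold Spec_fewest_number; infer_instance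

-- ===== CLAIM (what is proved, stated in full; the proofs are below) =====
def Claim_equal_fewest_number : Prop := ∀ (bricks : List (List Int)), Dom_fewest_number bricks → Pre_fewest_number bricks → Spec_fewest_number bricks (fewest_number bricks)

-- ===== LEMMAS AND PROOFS =====

-- prefix sums starting from s: the cut positions a brick prefix contributes
def ps : Int → List Int → List Int
  | _, [] => []
  | s, c :: t => (s + c) :: ps (s + c) t

theorem ps_length (s : Int) (l : List Int) : (ps s l).length = l.length := by
  induction l generalizing s with
  | nil => rfl
  | cons c t ih => simp [ps, ih]

-- A's per-position update is the standard counter insert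
theorem fnAStep_eq (d : PySem.Dict Int Int) (s cut : Int) :
    fnAStep (s, d) cut = (s + cut, d.insert (s + cut) (d.getD (s + cut) 0 + 1)) := by
  unfold fnAStep
  simp only
  rcases h : d.get? (s + cut) with _ | v
  · simp [h, PySem.Dict.getD_eq_get?_getD, PySem.Dict.get?_insert_self,
      PySem.Dict.insert_insert_self]
  · by_cases hv : v = 0
    · simp [h, hv, PySem.Dict.getD_eq_get?_getD, PySem.Dict.get?_insert_self,
        PySem.Dict.insert_insert_self]
    · simp [h, hv, PySem.Dict.getD_eq_get?_getD]

theorem innerA (sl : List Int) (s : Int) (d : PySem.Dict Int Int) :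
    (sl.foldl fnAStep (s, d)).2
      = (ps s sl).foldl (fun d x => d.insert x (d.getD x 0 + 1)) d := by
  induction sl generalizing s d with
  | nil => rfl
  | cons c t ih => rw [List.foldl_cons, fnAStep_eq, ih]; rfl

theorem innerB (sl : List Int) (s : Int) (acc : List Int) :
    (sl.foldl fnBStep (s, acc)).2 = acc ++ ps s sl := by
  induction sl generalizing s acc with
  | nil => simp [ps]
  | cons c t ih => rw [List.foldl_cons]; simp [fnBStep, ps, ih]

-- the flattened list of all cut positions
def allPos (bricks : List (List Int)) : List Int :=
  bricks.flatMap (fun b => ps 0 b.dropLast)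

theorem outerA (bricks : List (List Int)) (d : PySem.Dict Int Int) :
    bricks.foldl
        (fun cuts brick =>
          ((PySem.List.slice brick none (some (-1))).foldl fnAStep ((0 : Int), cuts)).2) d
      = (allPos bricks).foldl (fun d x => d.insert x (d.getD x 0 + 1)) d := by
  induction bricks generalizing d with
  | nil => rfl
  | cons b t ih =>
    rw [List.foldl_cons, ih]
    simp only [PySem.List.slice_to_neg_one, innerA, allPos, List.flatMap_cons, List.foldl_append]

theorem outerB (bricks : List (List Int)) (acc : List Int) :
    bricks.foldl
        (fun positions brick =>
          ((PySem.List.slice brick none (some (-1))).foldl fnBStep ((0 : Int), positions)).2) acc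
      = acc ++ allPos bricks := by
  induction bricks generalizing acc with
  | nil => simp [allPos]
  | cons b t ih =>
    rw [List.foldl_cons, ih]
    simp only [PySem.List.slice_to_neg_one, innerB, allPos, List.flatMap_cons, List.append_assoc]

-- scan lower bound: on a sorted tail all ≥ a, the result dominates best, the continued a-run,
-- and every element's count
theorem count_tail_le (y h : Int) (t : List Int) :
    List.count y t ≤ List.count y (h :: t) := by
  by_cases hyh : y = h
  · subst hyh; rw [List.count_cons_self (a := y) (l := t)]; omega
  · rw [List.count_cons_of_ne (Ne.symm hyh) (l := t)]

theorem scan_lower (l : List Int) (a best run : Int)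
    (hs : l.Pairwise (· ≤ ·)) (ha : ∀ x ∈ l, a ≤ x) (hrb : run ≤ best) (hr0 : 0 ≤ run) :
    best ≤ fnScan l (some a) best run ∧
    run + (l.count a : Int) ≤ fnScan l (some a) best run ∧
    ∀ y ∈ l, (l.count y : Int) ≤ fnScan l (some a) best run := by
  induction l generalizing a best run with
  | nil =>
    simp only [fnScan, List.count_nil, List.not_mem_nil, false_implies, implies_true, and_true,
      Nat.cast_zero, add_zero]
    omega
  | cons h t ih =>
    have hs' : t.Pairwise (· ≤ ·) := hs.tail
    have hht : ∀ x ∈ t, h ≤ x := fun x hx => (List.pairwise_cons.mp hs).1 x hx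
    by_cases hha : h = a
    · subst hha
      rw [show fnScan (h :: t) (some h) best run
          = fnScan t (some h) (if best < run + 1 then run + 1 else best) (run + 1) from by
        simp [fnScan]]
      set b' := if best < run + 1 then run + 1 else best with hb'
      have hbb : best ≤ b' ∧ run + 1 ≤ b' := by rw [hb']; split <;> omega
      obtain ⟨ib, ir, ic⟩ := ih h b' (run + 1) hs' hht (by omega) (by omega)
      refine ⟨by omega, ?_, ?_⟩
      · have hc := (List.count_cons_self (a := h) (l := t))
        omega
      · intro y hy
        rcases List.mem_cons.mp hy with rfl | hy'
        · have hc := (List.count_cons_self (a := y) (l := t))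
          omega
        · by_cases hyh : y = h
          · subst hyh
            have hc := (List.count_cons_self (a := y) (l := t))
            omega
          · have hc := (List.count_cons_of_ne (Ne.symm hyh) (l := t))
            have := ic y hy'
            omega
    · rw [show fnScan (h :: t) (some a) best run
          = fnScan t (some h) (if best < 1 then 1 else best) 1 from by
        simp [fnScan, hha]]
      set b' := if best < 1 then 1 else best with hb'
      have hbb : best ≤ b' ∧ 1 ≤ b' := by rw [hb']; split <;> omega
      obtain ⟨ib, ir, ic⟩ := ih h b' 1 hs' hht (by omega) (by omega)
      have hanot : List.count a (h :: t) = 0 := by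
        refine List.count_eq_zero.mpr (fun hm => ?_)
        rcases List.mem_cons.mp hm with rfl | hm'
        · exact hha rfl
        · exact hha (le_antisymm (hht a hm') (ha h List.mem_cons_self))
      refine ⟨by omega, ?_, ?_⟩
      · rw [hanot]
        push_cast
        omega
      · intro y hy
        rcases List.mem_cons.mp hy with rfl | hy'
        · have hc := (List.count_cons_self (a := y) (l := t))
          omega
        · by_cases hyh : y = h
          · subst hyh
            have hc := (List.count_cons_self (a := y) (l := t))
            omega
          · have hc := (List.count_cons_of_ne (Ne.symm hyh) (l := t))
            have := ic y hy'
            omega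

-- scan upper bound
theorem scan_upper (l : List Int) (a best run B : Int)
    (hb : best ≤ B) (hr : run + (l.count a : Int) ≤ B)
    (hc : ∀ y ∈ l, (l.count y : Int) ≤ B) :
    fnScan l (some a) best run ≤ B := by
  induction l generalizing a best run with
  | nil => simpa [fnScan] using hb
  | cons h t ih =>
    by_cases hha : h = a
    · subst hha
      rw [show fnScan (h :: t) (some h) best run
          = fnScan t (some h) (if best < run + 1 then run + 1 else best) (run + 1) from by
        simp [fnScan]]
      have hcnt := (List.count_cons_self (a := h) (l := t))
      refine ih h _ (run + 1) ?_ (by omega) ?_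
      · split <;> omega
      · intro y hy
        have h1 := count_tail_le y h t
        have := hc y (List.mem_cons_of_mem h hy)
        omega
    · rw [show fnScan (h :: t) (some a) best run
          = fnScan t (some h) (if best < 1 then 1 else best) 1 from by
        simp [fnScan, hha]]
      have hcnt := (List.count_cons_self (a := h) (l := t))
      have hhB := hc h List.mem_cons_self
      refine ih h _ 1 ?_ (by omega) ?_
      · split <;> omega
      · intro y hy
        have h1 := count_tail_le y h t
        have := hc y (List.mem_cons_of_mem h hy)
        omega

-- fnScan on a sorted nonempty list equals any B that is the (attained) max of the counts
theorem scan_eq_of_maxcount (l : List Int) (hs : l.Pairwise (· ≤ ·)) (B : Int)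
    (hmem : ∃ k ∈ l, B = (l.count k : Int)) (hub : ∀ y ∈ l, (l.count y : Int) ≤ B) :
    fnScan l none 0 0 = B := by
  rcases l with _ | ⟨h, t⟩
  · rcases hmem with ⟨k, hk, _⟩
    exact absurd hk List.not_mem_nil
  · have step : fnScan (h :: t) none 0 0 = fnScan t (some h) 1 1 := by
      simp [fnScan]
    have hs' : t.Pairwise (· ≤ ·) := hs.tail
    have hht : ∀ x ∈ t, h ≤ x := fun x hx => (List.pairwise_cons.mp hs).1 x hx
    have hcnt := (List.count_cons_self (a := h) (l := t))
    rw [step]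
    have lower := scan_lower t h 1 1 hs' hht le_rfl (by omega)
    have upper : fnScan t (some h) 1 1 ≤ B := by
      have hhB := hub h List.mem_cons_self
      refine scan_upper t h 1 1 B (by omega) (by omega) ?_
      intro y hy
      have h1 := count_tail_le y h t
      have := hub y (List.mem_cons_of_mem h hy)
      omega
    rcases hmem with ⟨k, hk, hB⟩
    have lowerB : B ≤ fnScan t (some h) 1 1 := by
      rcases List.mem_cons.mp hk with rfl | hk'
      · omega
      · by_cases hkh : k = h
        · subst hkh
          omega
        · have hc := (List.count_cons_of_ne (Ne.symm hkh) (l := t))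
          have := lower.2.2 k hk'
          omega
    omega

theorem allPos_ne_nil (bricks : List (List Int)) (hp : Pre_fewest_number bricks) :
    allPos bricks ≠ [] := by
  unfold Pre_fewest_number at hp
  rw [List.any_eq_true] at hp
  rcases hp with ⟨b, hb, hlen⟩
  have hlen' : 2 ≤ b.length := by simpa using hlen
  intro hnil
  have : ps 0 b.dropLast ≠ [] := by
    intro h0
    have := ps_length 0 b.dropLast
    rw [h0] at this
    simp [List.length_dropLast] at this
    omega
  exact this (List.flatMap_eq_nil_iff.mp hnil _ hb)

-- ===== VERDICT (by name: the statement is the Claim_ definition above) =====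
theorem fewest_number_spec : Claim_equal_fewest_number := by
  intro bricks _ hp
  unfold Spec_fewest_number fewest_number fewest_number_alt
  simp only
  rw [outerA, outerB, PySem.Dict.foldl_insert_getD_add_one_eq_counter]
  set L := allPos bricks with hL
  have hLne : L ≠ [] := allPos_ne_nil bricks hp
  set S := PySem.List.sorted (([] : List Int) ++ L) (fun x => x) false with hS
  have hperm : S.Perm L := by
    simpa using PySem.List.sorted_perm (([] : List Int) ++ L) (fun x => x) false
  have hpair : S.Pairwise (· ≤ ·) := by
    simpa using PySem.List.sorted_pairwise (([] : List Int) ++ L) (fun x => x)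
  -- A's side: max over the counter's keys
  rw [PySem.Dict.keys_counter]
  have hkeysne : PySem.Set.ofList L ≠ [] := by
    rcases List.exists_mem_of_ne_nil L hLne with ⟨x, hx⟩
    intro h0
    have : x ∈ PySem.Set.ofList L := (PySem.Set.mem_ofList _ _).mpr hx
    rw [h0] at this
    exact List.not_mem_nil this
  rcases hmax : PySem.List.max? (PySem.Set.ofList L)
      (fun k => (PySem.Dict.counter L).getD k 0) with _ | k
  · rw [PySem.List.max?_eq_none_iff] at hmax
    exact absurd hmax hkeysne
  · have hkmem : k ∈ L := (PySem.Set.mem_ofList _ _).mp (PySem.List.max?_mem hmax)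
    have hkmax := PySem.List.max?_isMax hmax
    -- B's side: scan of the sorted list
    show (PySem.Dict.counter L).getD k 0 = fnScan S none 0 0
    refine (scan_eq_of_maxcount S hpair _ ?_ ?_).symm
    · refine ⟨k, hperm.mem_iff.mpr hkmem, ?_⟩
      rw [hperm.count_eq, PySem.Dict.getD_counter]
    · intro y hy
      have hyL : y ∈ L := hperm.mem_iff.mp hy
      have := hkmax y ((PySem.Set.mem_ofList _ _).mpr hyL)
      rw [PySem.Dict.getD_counter, PySem.Dict.getD_counter] at this
      rw [hperm.count_eq, PySem.Dict.getD_counter]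
      exact this
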